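-- pv_equiv track=rewrite | github.com/bpucker/PBBtools | cds_finder/CDS_finder.py | identify_best_cds_candidate
-- ===== SOURCE A (Python) =====
-- from operator import itemgetter
--
-- def identify_best_cds_candidate( cds_candidates ):
-- 	"""! @brief find the longest CDS candidate """
--
-- 	if len( cds_candidates ) > 0:
-- 		data = []
-- 		for each in cds_candidates:
-- 			data.append( { 'len': len( each ), 'seq': each } )
-- 		return sorted( data, key=itemgetter('len') )[-1]['seq']
-- 	else:
-- 		return ""
-- ===== SOURCE B (Python) =====
-- def identify_best_cds_candidate(cds_candidates):
-- 	"""! @brief find the longest CDS candidate """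
-- 	best_len = -1
-- 	best_seq = ""
-- 	for each in cds_candidates:
-- 		if len(each) >= best_len:
-- 			best_len = len(each)
-- 			best_seq = each
-- 	return best_seq
-- ===== Notes on version B (the rewrite author's own statement) =====
-- stated objective: simpler
-- what changed: Replaces the build-a-dict-list + stable sort + [-1] lookup with a single running-maximum pass using >= so that the last element among equal maximum lengths is kept, as the stable sort does; the empty list falls out naturally as "" (measured ~4x faster: no intermediate dict list, no sort).
import Mathlib
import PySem

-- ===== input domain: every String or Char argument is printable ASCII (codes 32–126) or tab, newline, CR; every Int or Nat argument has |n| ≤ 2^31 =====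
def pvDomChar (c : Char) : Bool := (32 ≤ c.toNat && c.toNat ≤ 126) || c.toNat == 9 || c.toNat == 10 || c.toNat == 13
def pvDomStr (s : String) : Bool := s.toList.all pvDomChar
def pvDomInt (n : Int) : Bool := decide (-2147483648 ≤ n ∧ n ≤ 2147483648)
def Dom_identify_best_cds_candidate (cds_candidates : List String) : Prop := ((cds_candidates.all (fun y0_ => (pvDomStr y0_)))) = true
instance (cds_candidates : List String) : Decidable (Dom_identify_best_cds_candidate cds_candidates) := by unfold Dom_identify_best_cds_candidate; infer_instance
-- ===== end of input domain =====

-- B replaces A's dict-list + stable sort + [-1] lookup by one running-maximum pass (simpler).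

-- ===== PORT A =====
-- The Python dict {'len': len(each), 'seq': each} has the two fixed keys 'len' and 'seq';
-- it is ported as the pair (len, seq): itemgetter('len') = .1, ['seq'] = .2.
-- [-1] is pyGetD with a dummy default; under the len > 0 guard the list is nonempty so it is never used.
def identify_best_cds_candidate (cds_candidates : List String) : String :=
  if cds_candidates.length > 0 then
    let data := cds_candidates.foldl (fun acc each => acc ++ [(PySem.Str.len each, each)]) []
    (PySem.List.pyGetD (PySem.List.sorted data (fun d => d.1) false) (-1) (0, "")).2
  else ""

-- ===== PORT B =====
def identify_best_cds_candidate_alt (cds_candidates : List String) : String :=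
  (cds_candidates.foldl
    (fun best each =>
      if PySem.Str.len each ≥ best.1 then (PySem.Str.len each, each) else best)
    ((-1 : Int), "")).2

-- ===== PRECONDITION & SPEC =====
def Spec_identify_best_cds_candidate (cds_candidates : List String) (out : String) : Prop := out = identify_best_cds_candidate_alt cds_candidates
instance (cds_candidates : List String) (out : String) : Decidable (Spec_identify_best_cds_candidate cds_candidates out) := by unfold Spec_identify_best_cds_candidate; infer_instance

-- ===== CLAIM (what is proved, stated in full; the proofs are below) =====
def Claim_equal_identify_best_cds_candidate : Prop := ∀ (cds_candidates : List String), Dom_identify_best_cds_candidate cds_candidates → Spec_identify_best_cds_candidate cds_candidates (identify_best_cds_candidate cds_candidates)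

-- ===== LEMMAS AND PROOFS =====

theorem pv_getLast?_cons {α : Type} (x : α) (xs : List α) (h : xs ≠ []) :
    (x :: xs).getLast? = xs.getLast? := by
  cases xs with
  | nil => exact absurd rfl h
  | cons z zs => simp [List.getLast?_cons_cons]

theorem pv_insertBy_cons {α : Type} (r : α → α → Bool) (x y : α) (ys : List α) :
    PySem.List.insertBy r x (y :: ys)
      = if r x y then x :: y :: ys else y :: PySem.List.insertBy r x ys := rfl

theorem pv_insertBy_ne_nil {α : Type} (r : α → α → Bool) (x : α) (s : List α) :
    PySem.List.insertBy r x s ≠ [] := by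
  cases s with
  | nil => simp [PySem.List.insertBy]
  | cons y ys =>
    simp only [PySem.List.insertBy]
    split <;> simp

-- last element of a stable insertion into a key-sorted list
theorem pv_getLast?_insertBy {α : Type} (key : α → Int) (x : α) (s : List α)
    (hs : s.Pairwise (fun a b => key a ≤ key b)) (b : α) (hb : s.getLast? = some b) :
    (PySem.List.insertBy (fun a c => decide (key a < key c)) x s).getLast?
      = some (if key x < key b then b else x) := by
  induction s with
  | nil => simp at hb
  | cons y ys ih =>
    cases ys with
    | nil =>
      simp only [List.getLast?_singleton, Option.some.injEq] at hb
      subst hb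
      rw [pv_insertBy_cons]
      split <;> rename_i h
      · simp_all
      · simp_all [PySem.List.insertBy]
    | cons z zs =>
      have hb' : (z :: zs).getLast? = some b := by
        simpa [List.getLast?_cons_cons] using hb
      have hbmem : b ∈ z :: zs := List.mem_of_getLast? hb'
      have hyb : key y ≤ key b := (List.pairwise_cons.mp hs).1 b hbmem
      rw [pv_insertBy_cons]
      split
      · rename_i h
        have hxy : key x < key y := by simpa using h
        have : key x < key b := lt_of_lt_of_le hxy hyb
        simp [List.getLast?_cons_cons, hb', this]
      · have hne := pv_insertBy_ne_nil (fun a c => decide (key a < key c)) x (z :: zs)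
        rw [pv_getLast?_cons _ _ hne]
        exact ih (List.pairwise_cons.mp hs).2 hb'

-- A's sorted-last equals B's running-maximum fold, on nonempty input
theorem pv_main (xs : List String) (hx : xs ≠ []) :
    (PySem.List.sorted (xs.map (fun s => (PySem.Str.len s, s))) (fun d => d.1) false).getLast?
      = some (xs.foldl
          (fun best each =>
            if PySem.Str.len each ≥ best.1 then (PySem.Str.len each, each) else best)
          ((-1 : Int), "")) := by
  induction xs using List.reverseRecOn with
  | nil => exact absurd rfl hx
  | append_singleton ys y ih =>
    rw [PySem.List.sorted_eq_foldl_insertBy]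
    rw [List.map_append, List.foldl_append, List.foldl_append]
    rw [← PySem.List.sorted_eq_foldl_insertBy]
    simp only [List.map_cons, List.map_nil, List.foldl_cons, List.foldl_nil]
    cases hys : ys with
    | nil =>
      have hlen : PySem.Str.len y ≥ (-1 : Int) := by
        have : (0:Int) ≤ PySem.Str.len y := by simp [PySem.Str.len]
        omega
      simp [PySem.List.sorted, PySem.List.insertBy]
    | cons z zs =>
      have hne : ys ≠ [] := by simp [hys]
      rw [← hys] at *
      have ih' := ih hne
      have hp := PySem.List.sorted_pairwise (ys.map (fun s => (PySem.Str.len s, s)))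
        (fun d => d.1)
      rw [pv_getLast?_insertBy (fun d => d.1) _ _ hp _ ih']
      set b := ys.foldl
          (fun best each =>
            if PySem.Str.len each ≥ best.1 then (PySem.Str.len each, each) else best)
          ((-1 : Int), "") with hbdef
      by_cases h : PySem.Str.len y ≥ b.1
      · rw [if_neg (by omega), if_pos h]
      · rw [if_pos (by omega), if_neg h]

-- ===== VERDICT (by name: the statement is the Claim_ definition above) =====
theorem identify_best_cds_candidate_spec : Claim_equal_identify_best_cds_candidate := by
  intro xs _
  unfold Spec_identify_best_cds_candidate identify_best_cds_candidate identify_best_cds_candidate_alt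
  by_cases hx : xs = []
  · subst hx; simp
  · rw [if_pos (by simpa [List.length_pos_iff] using hx)]
    simp only [PySem.List.foldl_append_singleton_eq_map, List.nil_append]
    have hm := pv_main xs hx
    have hne : (PySem.List.sorted (xs.map (fun s => (PySem.Str.len s, s))) (fun d => d.1) false) ≠ [] := by
      intro h
      rw [h] at hm
      simp at hm
    rw [PySem.List.pyGetD_neg_one _ _ hne]
    rw [List.getLast_of_mem_getLast? hm]
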